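-- pv_equiv track=rewrite | github.com/Vilayat-Ali/jmi-data-analytics-lab | assessment_03/dissimilar.py | dissim_matrix_nominal
-- ===== SOURCE A (Python) =====
-- def dissim_matrix_nominal(arr: list[str]) -> list[list[int]]:
--     dissim_matrix: list[list[int]] = []
--
--     for i in range(len(arr)):
--         row = []
--         for j in range(len(arr)):
--             if arr[i] == arr[j]:
--                 row.append(0)
--             else:
--                 row.append(1)
--         dissim_matrix.append(row)
--
--     return dissim_matrix
-- ===== SOURCE B (Python) =====
-- def dissim_matrix_nominal(arr: list[str]) -> list[list[int]]:
--     # group-then-block-fill: all-ones matrix; zero out the block of each value group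
--     n = len(arr)
--     groups: dict[str, list[int]] = {}
--     for i in range(n):
--         groups.setdefault(arr[i], []).append(i)
--     matrix = [[1] * n for _ in range(n)]
--     for idxs in groups.values():
--         for i in idxs:
--             for j in idxs:
--                 matrix[i][j] = 0
--     return matrix
-- ===== Notes on version B (the rewrite author's own statement) =====
-- stated objective: alternative
-- what changed: Replaces the nested all-pairs string comparison with a group-then-block-fill: one pass builds value->indices groups, the matrix starts as all ones, and zeros are written only inside each group's index block (no per-pair comparison).
import Mathlib
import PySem

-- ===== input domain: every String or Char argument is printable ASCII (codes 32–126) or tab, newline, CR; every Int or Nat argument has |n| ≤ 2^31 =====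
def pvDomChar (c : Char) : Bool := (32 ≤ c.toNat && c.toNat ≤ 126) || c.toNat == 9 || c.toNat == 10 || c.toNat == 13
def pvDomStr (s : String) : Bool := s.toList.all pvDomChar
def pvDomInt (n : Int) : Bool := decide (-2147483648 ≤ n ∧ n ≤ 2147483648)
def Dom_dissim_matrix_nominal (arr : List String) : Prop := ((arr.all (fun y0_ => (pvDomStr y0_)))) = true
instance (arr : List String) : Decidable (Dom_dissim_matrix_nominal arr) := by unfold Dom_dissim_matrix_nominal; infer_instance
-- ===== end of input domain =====

-- B replaces A's all-pairs string comparison by grouping equal values once and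
-- zero-filling each group's index block in an all-ones matrix (a different algorithm of similar cost).


-- ===== PORT A =====
-- literal port of A: for i in range(len(arr)): for j in range(len(arr)): append 0/1.
-- arr[i] is ported as arr.getD i "" — exact, since every index drawn from range(len(arr)) is in range.
def dissim_matrix_nominal (arr : List String) : List (List Int) :=
  (List.range arr.length).foldl (fun dissim_matrix i =>
    dissim_matrix ++ [(List.range arr.length).foldl (fun row j =>
      row ++ [if arr.getD i "" = arr.getD j "" then (0 : Int) else 1]) []]) []

-- ===== PORT B =====
-- groups.setdefault(arr[i], []).append(i)  ==  modify (arr[i]) [] (· ++ [i])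
def pvGroups (arr : List String) : PySem.Dict String (List Nat) :=
  (List.range arr.length).foldl
    (fun groups i => groups.modify (arr.getD i "") [] (fun l => l ++ [i])) PySem.Dict.empty

-- matrix[i][j] = 0 is ported as List.modify/List.set — exact, since i, j come from groups and are in range.
def dissim_matrix_nominal_alt (arr : List String) : List (List Int) :=
  let n := arr.length
  let matrix := (List.range n).map (fun _ => List.replicate n (1 : Int))
  (pvGroups arr).values.foldl (fun matrix idxs =>
    idxs.foldl (fun matrix i =>
      idxs.foldl (fun matrix j => matrix.modify i (fun row => row.set j 0)) matrix) matrix) matrix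

-- ===== PRECONDITION & SPEC =====
def Spec_dissim_matrix_nominal (arr : List String) (out : List (List Int)) : Prop := out = dissim_matrix_nominal_alt arr
instance (arr : List String) (out : List (List Int)) : Decidable (Spec_dissim_matrix_nominal arr out) := by unfold Spec_dissim_matrix_nominal; infer_instance

-- ===== CLAIM (what is proved, stated in full; the proofs are below) =====
def Claim_equal_dissim_matrix_nominal : Prop := ∀ (arr : List String), Dom_dissim_matrix_nominal arr → Spec_dissim_matrix_nominal arr (dissim_matrix_nominal arr)

-- ===== LEMMAS AND PROOFS =====

-- the common pointwise description of both matrices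
def pvEntry (m : List (List Int)) (i j : Nat) : Int := (m.getD i []).getD j 0

def pvShape (m : List (List Int)) (n : Nat) : Prop :=
  m.length = n ∧ ∀ k, k < n → (m.getD k []).length = n

lemma pvA_eq (arr : List String) :
    dissim_matrix_nominal arr =
      (List.range arr.length).map (fun i => (List.range arr.length).map
        (fun j => if arr.getD i "" = arr.getD j "" then (0 : Int) else 1)) := by
  unfold dissim_matrix_nominal
  simp only [PySem.List.foldl_append_singleton_eq_map, List.nil_append]

lemma pvGroups_getD (arr : List String) (v : String) :
    (pvGroups arr).getD v [] = (List.range arr.length).filter (fun i => arr.getD i "" == v) := by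
  have h := PySem.Dict.getD_foldl_modify_append
      ((List.range arr.length).map (fun i => (arr.getD i "", i))) (PySem.Dict.empty) v
  rw [List.foldl_map] at h
  unfold pvGroups
  rw [h]
  simp [List.filter_map, Function.comp_def]

lemma pvGroups_mem (arr : List String) (v : String) (i : Nat) :
    i ∈ (pvGroups arr).getD v [] ↔ i < arr.length ∧ arr.getD i "" = v := by
  simp [pvGroups_getD, List.mem_filter, List.mem_range]

lemma pvGroups_keys_nodup (arr : List String) : (pvGroups arr).keys.Nodup := by
  unfold pvGroups
  exact PySem.Dict.nodup_keys_foldl_modify_key (List.range arr.length)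
    (fun i => arr.getD i "") [] (fun _ i l => l ++ [i]) PySem.Dict.empty (by simp)

lemma pvGroups_mem_keys (arr : List String) (v : String) :
    v ∈ (pvGroups arr).keys ↔ ∃ i, i < arr.length ∧ arr.getD i "" = v := by
  unfold pvGroups
  rw [PySem.Dict.keys_foldl_modify_key (List.range arr.length)
    (fun i => arr.getD i "") [] (fun _ i l => l ++ [i]) PySem.Dict.empty]
  simp [PySem.Set.mem_update, eq_comm]

lemma pvTouched_iff (arr : List String) (i j : Nat) (hi : i < arr.length) (hj : j < arr.length) :
    (∃ l ∈ (pvGroups arr).values, i ∈ l ∧ j ∈ l) ↔ arr.getD i "" = arr.getD j "" := by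
  rw [PySem.Dict.values_eq_map_keys (pvGroups arr) (pvGroups_keys_nodup arr) []]
  constructor
  · rintro ⟨l, hl, hil, hjl⟩
    obtain ⟨v, hv, rfl⟩ := List.mem_map.mp hl
    have h1 := (pvGroups_mem arr v i).mp hil
    have h2 := (pvGroups_mem arr v j).mp hjl
    rw [h1.2, h2.2]
  · intro h
    refine ⟨(pvGroups arr).getD (arr.getD i "") [], ?_, ?_, ?_⟩
    · exact List.mem_map.mpr ⟨arr.getD i "", (pvGroups_mem_keys arr _).mpr ⟨i, hi, rfl⟩, rfl⟩
    · exact (pvGroups_mem arr _ i).mpr ⟨hi, rfl⟩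
    · exact (pvGroups_mem arr _ j).mpr ⟨hj, h.symm⟩

lemma pvGetD_modify (m : List (List Int)) (i k : Nat) (f : List Int → List Int) :
    (m.modify i f).getD k [] =
      if i = k ∧ k < m.length then f (m.getD k []) else m.getD k [] := by
  rw [List.getD_eq_getElem?_getD, List.getD_eq_getElem?_getD, List.getElem?_modify]
  by_cases hk : k < m.length
  · rw [List.getElem?_eq_getElem hk]
    by_cases hik : i = k <;> simp [hik, hk]
  · rw [List.getElem?_eq_none (by omega)]
    simp [hk]

lemma pvGetD_set (r : List Int) (j j' : Nat) :
    (r.set j 0).getD j' 0 = if j = j' ∧ j' < r.length then 0 else r.getD j' 0 := by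
  rw [List.getD_eq_getElem?_getD, List.getD_eq_getElem?_getD, List.getElem?_set]
  by_cases hjj : j = j'
  · subst hjj
    by_cases hj : j < r.length <;> simp [hj]
  · simp [hjj]

lemma pvEntry_modify (m : List (List Int)) (n i j : Nat) (hsh : pvShape m n)
    (hi : i < n) (hj : j < n) (i' j' : Nat) :
    pvEntry (m.modify i (fun r => r.set j 0)) i' j' =
      if i = i' ∧ j = j' then 0 else pvEntry m i' j' := by
  unfold pvEntry
  rw [pvGetD_modify]
  by_cases hii : i = i'
  · subst hii
    have hlen : i < m.length := by rw [hsh.1]; exact hi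
    rw [if_pos ⟨rfl, hlen⟩, pvGetD_set]
    have hrow : (m.getD i []).length = n := hsh.2 i hi
    by_cases hjj : j = j'
    · subst hjj
      rw [if_pos ⟨rfl, by rw [hrow]; exact hj⟩, if_pos ⟨rfl, rfl⟩]
    · rw [if_neg (by tauto), if_neg (by tauto)]
  · rw [if_neg (by tauto), if_neg (by tauto)]

lemma pvShape_modify (m : List (List Int)) (n i j : Nat) (hsh : pvShape m n) :
    pvShape (m.modify i (fun r => r.set j 0)) n := by
  refine ⟨by rw [List.length_modify]; exact hsh.1, ?_⟩
  intro k hk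
  rw [pvGetD_modify]
  split
  · rw [List.length_set]; exact hsh.2 k hk
  · exact hsh.2 k hk

lemma pvFill_cols (js : List Nat) (m : List (List Int)) (n i : Nat)
    (hsh : pvShape m n) (hi : i < n) (hjs : ∀ j ∈ js, j < n) :
    pvShape (js.foldl (fun m j => m.modify i (fun row => row.set j 0)) m) n ∧
    ∀ i' j', pvEntry (js.foldl (fun m j => m.modify i (fun row => row.set j 0)) m) i' j' =
      if i = i' ∧ j' ∈ js then 0 else pvEntry m i' j' := by
  induction js generalizing m with
  | nil => exact ⟨hsh, fun i' j' => by simp⟩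
  | cons j js ih =>
    have hjn : j < n := hjs j (List.mem_cons_self ..)
    obtain ⟨sh2, ent2⟩ := ih (m.modify i (fun r => r.set j 0))
      (pvShape_modify m n i j hsh) (fun a ha => hjs a (List.mem_cons_of_mem _ ha))
    refine ⟨sh2, fun i' j' => ?_⟩
    rw [List.foldl_cons, ent2, pvEntry_modify m n i j hsh hi hjn]
    by_cases hii : i = i' <;> by_cases hjj : j = j' <;> by_cases hmem : j' ∈ js <;>
      simp [hii, hjj, hmem, eq_comm]

lemma pvFill_group (is js : List Nat) (m : List (List Int)) (n : Nat)
    (hsh : pvShape m n) (his : ∀ i ∈ is, i < n) (hjs : ∀ j ∈ js, j < n) :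
    pvShape (is.foldl (fun m i => js.foldl (fun m j => m.modify i (fun row => row.set j 0)) m) m) n ∧
    ∀ i' j', pvEntry (is.foldl (fun m i => js.foldl (fun m j => m.modify i (fun row => row.set j 0)) m) m) i' j' =
      if i' ∈ is ∧ j' ∈ js then 0 else pvEntry m i' j' := by
  induction is generalizing m with
  | nil => exact ⟨hsh, fun i' j' => by simp⟩
  | cons i is ih =>
    have hin : i < n := his i (List.mem_cons_self ..)
    obtain ⟨sh1, ent1⟩ := pvFill_cols js m n i hsh hin hjs
    obtain ⟨sh2, ent2⟩ := ih _ sh1 (fun a ha => his a (List.mem_cons_of_mem _ ha))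
    refine ⟨sh2, fun i' j' => ?_⟩
    rw [List.foldl_cons, ent2, ent1]
    by_cases h1 : i' ∈ is <;> by_cases h2 : i = i' <;> by_cases h3 : j' ∈ js <;>
      simp [h1, h2, h3, eq_comm]

lemma pvFill_all (gs : List (List Nat)) (m : List (List Int)) (n : Nat)
    (hsh : pvShape m n) (hg : ∀ l ∈ gs, ∀ i ∈ l, i < n) :
    pvShape (gs.foldl (fun m idxs => idxs.foldl (fun m i => idxs.foldl (fun m j => m.modify i (fun row => row.set j 0)) m) m) m) n ∧
    ∀ i' j', pvEntry (gs.foldl (fun m idxs => idxs.foldl (fun m i => idxs.foldl (fun m j => m.modify i (fun row => row.set j 0)) m) m) m) i' j' =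
      if ∃ l ∈ gs, i' ∈ l ∧ j' ∈ l then 0 else pvEntry m i' j' := by
  induction gs generalizing m with
  | nil => exact ⟨hsh, fun i' j' => by simp⟩
  | cons l gs ih =>
    obtain ⟨sh1, ent1⟩ := pvFill_group l l m n hsh
      (hg l (List.mem_cons_self ..)) (hg l (List.mem_cons_self ..))
    obtain ⟨sh2, ent2⟩ := ih _ sh1 (fun a ha => hg a (List.mem_cons_of_mem _ ha))
    refine ⟨sh2, fun i' j' => ?_⟩
    rw [List.foldl_cons, ent2, ent1]
    by_cases h1 : ∃ x ∈ gs, i' ∈ x ∧ j' ∈ x <;> by_cases h2 : i' ∈ l ∧ j' ∈ l <;>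
      simp [h1, h2]

lemma pvB_eq (arr : List String) :
    dissim_matrix_nominal_alt arr =
      (List.range arr.length).map (fun i => (List.range arr.length).map
        (fun j => if arr.getD i "" = arr.getD j "" then (0 : Int) else 1)) := by
  have hsh0 : pvShape ((List.range arr.length).map (fun _ => List.replicate arr.length (1 : Int))) arr.length := by
    refine ⟨by simp, fun k hk => ?_⟩
    rw [List.getD_eq_getElem?_getD, List.getElem?_map, List.getElem?_range hk]
    simp
  have hg : ∀ l ∈ (pvGroups arr).values, ∀ i ∈ l, i < arr.length := by
    rw [PySem.Dict.values_eq_map_keys (pvGroups arr) (pvGroups_keys_nodup arr) []]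
    intro l hl i hil
    obtain ⟨v, hv, rfl⟩ := List.mem_map.mp hl
    exact ((pvGroups_mem arr v i).mp hil).1
  obtain ⟨shF, entF⟩ := pvFill_all (pvGroups arr).values _ arr.length hsh0 hg
  unfold dissim_matrix_nominal_alt
  apply List.ext_getElem
  · rw [shF.1]; simp
  · intro k h1 h2
    have hk : k < arr.length := by rw [shF.1] at h1; exact h1
    rw [List.getElem_map, List.getElem_range]
    have hrowlen : _ := shF.2 k hk
    apply List.ext_getElem
    · rw [← List.getD_eq_getElem _ [] h1, hrowlen]; simp
    · intro j hj1 hj2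
      have hjn : j < arr.length := by
        rw [← List.getD_eq_getElem _ [] h1, hrowlen] at hj1; exact hj1
      have he := entF k j
      rw [pvEntry, List.getD_eq_getElem _ [] h1, List.getD_eq_getElem _ 0 hj1] at he
      have h0 : pvEntry ((List.range arr.length).map (fun _ => List.replicate arr.length (1 : Int))) k j = 1 := by
        simp [pvEntry, List.getD_eq_getElem?_getD, hk, hjn]
      rw [h0] at he
      rw [he, List.getElem_map, List.getElem_range]
      simp only [pvTouched_iff arr k j hk hjn]

-- ===== VERDICT (by name: the statement is the Claim_ definition above) =====
theorem dissim_matrix_nominal_spec : Claim_equal_dissim_matrix_nominal := by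
  intro arr _
  unfold Spec_dissim_matrix_nominal
  rw [pvA_eq, pvB_eq]
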